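-- pv_equiv track=rewrite | github.com/chanh1311/Python_Basic_200 | Kteam/sap_xep_chuoi.py | digit_char_symbol
-- ===== SOURCE A (Python) =====
-- def digit_char_symbol(s):
--     digits = ""
--     chars = ""
--     symbols = ""
--
--     for c in s:
--         if c.islower() or c.isupper():
--             chars += c
--         elif c.isdigit():
--             digits += c
--         else:
--             symbols += c
--     chuoiSapXep = digits + chars + symbols
--
--     return len(digits), len(chars), len(symbols), chuoiSapXep
-- ===== SOURCE B (Python) =====
-- def digit_char_symbol(s):
--     digits = "".join(c for c in s if c.isdigit())
--     chars = "".join(c for c in s if c.islower() or c.isupper())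
--     symbols = "".join(c for c in s if not (c.isdigit() or c.islower() or c.isupper()))
--     return len(digits), len(chars), len(symbols), digits + chars + symbols
-- ===== Notes on version B (the rewrite author's own statement) =====
-- stated objective: idiomatic
-- what changed: Replaced the single fused accumulating loop with three independent filter passes (one join-comprehension per bucket), each selecting its category directly from the input string.
import Mathlib
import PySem

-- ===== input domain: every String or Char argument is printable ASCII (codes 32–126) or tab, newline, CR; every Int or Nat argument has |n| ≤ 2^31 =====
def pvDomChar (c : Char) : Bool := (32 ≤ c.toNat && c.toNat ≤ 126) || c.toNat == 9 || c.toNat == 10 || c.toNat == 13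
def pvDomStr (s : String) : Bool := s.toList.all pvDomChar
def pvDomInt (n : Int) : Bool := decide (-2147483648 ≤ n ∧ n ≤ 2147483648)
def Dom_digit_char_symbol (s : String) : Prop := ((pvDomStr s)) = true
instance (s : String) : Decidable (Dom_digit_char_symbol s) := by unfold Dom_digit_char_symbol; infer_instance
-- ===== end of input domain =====

-- B replaces A's single fused accumulating loop with three independent filter passes (one per bucket); idiomatic, same results.


-- ===== PORT A =====
-- A's loop: one pass appending each character to one of three growing strings.
def digit_char_symbol_step (acc : List Char × List Char × List Char) (c : Char) :
    List Char × List Char × List Char :=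
  if PySem.Chars.islower c || PySem.Chars.isupper c then (acc.1, acc.2.1 ++ [c], acc.2.2)
  else if PySem.Chars.isdigit c then (acc.1 ++ [c], acc.2.1, acc.2.2)
  else (acc.1, acc.2.1, acc.2.2 ++ [c])

def digit_char_symbol (s : String) : Int × Int × Int × String :=
  let st := s.toList.foldl digit_char_symbol_step ([], [], [])
  ((st.1.length : Int), (st.2.1.length : Int), (st.2.2.length : Int),
    String.mk (st.1 ++ st.2.1 ++ st.2.2))

-- ===== PORT B =====
-- B: three independent filter passes, one per bucket.
def digit_char_symbol_alt (s : String) : Int × Int × Int × String :=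
  let digits := s.toList.filter (fun c => PySem.Chars.isdigit c)
  let chars := s.toList.filter (fun c => PySem.Chars.islower c || PySem.Chars.isupper c)
  let symbols := s.toList.filter
    (fun c => !(PySem.Chars.isdigit c || PySem.Chars.islower c || PySem.Chars.isupper c))
  ((digits.length : Int), (chars.length : Int), (symbols.length : Int),
    String.mk (digits ++ chars ++ symbols))

-- ===== PRECONDITION & SPEC =====
def Spec_digit_char_symbol (s : String) (out : Int × Int × Int × String) : Prop := out = digit_char_symbol_alt s
instance (s : String) (out : Int × Int × Int × String) : Decidable (Spec_digit_char_symbol s out) := by unfold Spec_digit_char_symbol; infer_instance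

-- ===== CLAIM (what is proved, stated in full; the proofs are below) =====
def Claim_equal_digit_char_symbol : Prop := ∀ (s : String), Dom_digit_char_symbol s → Spec_digit_char_symbol s (digit_char_symbol s)

-- ===== LEMMAS AND PROOFS =====

-- The character classes A dispatches on are disjoint ranges, so the fused loop
-- fills each bucket with exactly the characters B's corresponding filter keeps.
theorem lower_upper_not_digit (c : Char) :
    (PySem.Chars.islower c || PySem.Chars.isupper c) = true →
    PySem.Chars.isdigit c = false := by
  unfold PySem.Chars.islower PySem.Chars.isupper PySem.Chars.isdigit
  simp [Char.le_def, UInt32.le_iff_toNat_le]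
  intro h
  rcases h with ⟨h1, h2⟩ | ⟨h1, h2⟩ <;> omega

theorem foldl_step_eq (l : List Char) (a b c : List Char) :
    l.foldl digit_char_symbol_step (a, b, c) =
      (a ++ l.filter (fun c => PySem.Chars.isdigit c),
       b ++ l.filter (fun c => PySem.Chars.islower c || PySem.Chars.isupper c),
       c ++ l.filter
         (fun c => !(PySem.Chars.isdigit c || PySem.Chars.islower c || PySem.Chars.isupper c))) := by
  induction l generalizing a b c with
  | nil => simp
  | cons x xs ih =>
    simp only [List.foldl_cons, List.filter_cons]
    by_cases hlu : (PySem.Chars.islower x || PySem.Chars.isupper x) = true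
    · have hd := lower_upper_not_digit x hlu
      simp [digit_char_symbol_step, hlu, hd, ih]
    · by_cases hdig : PySem.Chars.isdigit x = true
      · simp [digit_char_symbol_step, hlu, hdig, ih]
      · simp only [Bool.not_eq_true] at hlu hdig
        simp [digit_char_symbol_step, hlu, hdig, ih]

-- ===== VERDICT (by name: the statement is the Claim_ definition above) =====
theorem digit_char_symbol_spec : Claim_equal_digit_char_symbol := by
  intro s _
  unfold Spec_digit_char_symbol digit_char_symbol digit_char_symbol_alt
  simp [foldl_step_eq]
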